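-- pv_equiv track=rewrite | github.com/AnaGM2/Mathematics-Degree-Projects | Year-2/Algorithmics/Chapter-2/Practice-Exercises/variablesyfunciones.py | compositorial
-- ===== SOURCE A (Python) =====
-- def esprimo(num):
--     es_primo = True
--     for div in range(2, num):
--         if num % div == 0:
--             es_primo = False
--             break
--     return es_primo
--
-- def compositorial(num):
--     if num <= 3:
--         return 1
--     else:
--         resultado = 1
--         for i in range(4, num + 1):
--             if not esprimo(i):
--                 resultado *= i
--         return resultado
-- ===== SOURCE B (Python) =====
-- def compositorial(num):
--     if num <= 3:
--         return 1
--     primes = [2, 3]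
--     result = 1
--     for i in range(4, num + 1):
--         if any(i % p == 0 for p in primes if p * p <= i):
--             result *= i
--         else:
--             primes.append(i)
--     return result
-- ===== Notes on version B (the rewrite author's own statement) =====
-- stated objective: faster
-- what changed: B maintains an incremental list of primes found so far and tests each candidate only against primes p with p*p <= i, instead of A's per-number trial division by every integer below it; intended as faster (measured 5.0x at n=4096, the largest size both finished).
import Mathlib
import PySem

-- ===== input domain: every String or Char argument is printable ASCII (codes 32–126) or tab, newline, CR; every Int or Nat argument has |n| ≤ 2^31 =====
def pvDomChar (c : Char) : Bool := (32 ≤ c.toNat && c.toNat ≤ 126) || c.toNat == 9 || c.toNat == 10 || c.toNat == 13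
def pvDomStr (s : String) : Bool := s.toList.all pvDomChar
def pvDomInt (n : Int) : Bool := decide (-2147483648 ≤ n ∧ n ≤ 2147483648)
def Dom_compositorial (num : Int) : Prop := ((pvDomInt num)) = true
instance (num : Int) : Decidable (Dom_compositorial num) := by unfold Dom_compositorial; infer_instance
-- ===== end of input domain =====

-- B replaces A's per-number trial division by every smaller integer with an incrementally
-- maintained list of primes, testing each candidate only against primes p with p*p ≤ i (intended as faster; measured 5.0× at n=4096).


-- ===== PORT A =====
-- for-loop of esprimo with its break: structural recursion over the range list
def esprimoLoop (num : Int) : List Int → Bool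
  | [] => true
  | d :: ds => if PySem.Int.mod num d == 0 then false else esprimoLoop num ds

def esprimo (num : Int) : Bool :=
  esprimoLoop num (PySem.List.pyRange 2 num 1)

def compositorial (num : Int) : Int :=
  if num ≤ 3 then 1
  else (PySem.List.pyRange 4 (num + 1) 1).foldl
    (fun resultado i => if !(esprimo i) then resultado * i else resultado) 1

-- ===== PORT B =====
-- B's for-loop: state is (primes, result); the generator-any with its `if p*p <= i` filter
def compositorialAltLoop : List Int → List Int → Int → Int
  | [], _, result => result
  | i :: rest, primes, result =>
    if (primes.filter (fun p => decide (p * p ≤ i))).any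
        (fun p => PySem.Int.mod i p == 0)
    then compositorialAltLoop rest primes (result * i)
    else compositorialAltLoop rest (primes ++ [i]) result

def compositorial_alt (num : Int) : Int :=
  if num ≤ 3 then 1
  else compositorialAltLoop (PySem.List.pyRange 4 (num + 1) 1) [2, 3] 1

-- ===== PRECONDITION & SPEC =====
def Spec_compositorial (num : Int) (out : Int) : Prop := out = compositorial_alt num
instance (num : Int) (out : Int) : Decidable (Spec_compositorial num out) := by unfold Spec_compositorial; infer_instance

-- ===== CLAIM (what is proved, stated in full; the proofs are below) =====
def Claim_equal_compositorial : Prop := ∀ (num : Int), Dom_compositorial num → Spec_compositorial num (compositorial num)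

-- ===== LEMMAS AND PROOFS =====

-- A's inner loop returns true iff no divisor in the range list hits
theorem esprimoLoop_eq_true_iff (num : Int) (l : List Int) :
    esprimoLoop num l = true ↔ ∀ d ∈ l, ¬ d ∣ num := by
  induction l with
  | nil => simp [esprimoLoop]
  | cons d ds ih =>
    simp only [esprimoLoop]
    by_cases h : PySem.Int.mod num d = 0
    · simp [h, (PySem.Int.mod_eq_zero_iff_dvd num d).mp h]
    · have h' : ¬ d ∣ num := fun hd => h ((PySem.Int.mod_eq_zero_iff_dvd num d).mpr hd)
      simp [h, ih, h']

-- esprimo computes primality of num.toNat, for 2 ≤ num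
theorem esprimo_eq_true_iff (num : Int) (h2 : 2 ≤ num) :
    esprimo num = true ↔ Nat.Prime num.toNat := by
  rw [esprimo, esprimoLoop_eq_true_iff]
  rw [Nat.prime_def_lt']
  constructor
  · intro h
    refine ⟨by omega, fun m hm2 hmlt hdvd => ?_⟩
    have hmem : (m : Int) ∈ PySem.List.pyRange 2 num 1 := by
      rw [PySem.List.mem_pyRange_one]; omega
    have := h (m : Int) hmem
    apply this
    have : (m : Int) ∣ (num.toNat : Int) := Int.natCast_dvd_natCast.mpr hdvd
    rwa [Int.toNat_of_nonneg (by omega)] at this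
  · rintro ⟨-, h⟩ d hd hdvd
    rw [PySem.List.mem_pyRange_one] at hd
    have hd' : d.toNat ∣ num.toNat := by
      have : ((d.toNat : Int)) ∣ ((num.toNat : Int)) := by
        rwa [Int.toNat_of_nonneg (by omega), Int.toNat_of_nonneg (by omega)]
      exact Int.natCast_dvd_natCast.mp this
    exact h d.toNat (by omega) (by omega) hd'

-- the invariant on B's prime list
def PrimesUpTo (primes : List Int) (i : Int) : Prop :=
  ∀ p : Int, p ∈ primes ↔ 2 ≤ p ∧ p < i ∧ Nat.Prime p.toNat

-- B's membership test decides compositeness of i, under the invariant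
theorem altCond_iff (primes : List Int) (i : Int) (h4 : 4 ≤ i)
    (hinv : PrimesUpTo primes i) :
    ((primes.filter (fun p => decide (p * p ≤ i))).any
        (fun p => PySem.Int.mod i p == 0)) = true ↔ ¬ Nat.Prime i.toNat := by
  simp only [List.any_eq_true, List.mem_filter, decide_eq_true_eq, beq_iff_eq,
    PySem.Int.mod_eq_zero_iff_dvd]
  constructor
  · rintro ⟨p, ⟨hp, hsq⟩, hdvd⟩ hpr
    have hp' := (hinv p).mp hp
    obtain ⟨hp2, hplt, hppr⟩ := hp'
    have hdn : p.toNat ∣ i.toNat := by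
      have : ((p.toNat : Int)) ∣ ((i.toNat : Int)) := by
        rwa [Int.toNat_of_nonneg (by omega), Int.toNat_of_nonneg (by omega)]
      exact Int.natCast_dvd_natCast.mp this
    exact (Nat.prime_def_lt'.mp hpr).2 p.toNat (by omega) (by omega) hdn
  · intro hnpr
    set n := i.toNat with hn
    have hn4 : 4 ≤ n := by omega
    have hmf : Nat.Prime n.minFac := Nat.minFac_prime (by omega)
    have hdvd : n.minFac ∣ n := Nat.minFac_dvd n
    have hsq : n.minFac ^ 2 ≤ n := Nat.minFac_sq_le_self (by omega) hnpr
    have hmf2 : 2 ≤ n.minFac := hmf.two_le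
    have hlt : n.minFac < n := by nlinarith
    refine ⟨(n.minFac : Int), ⟨?_, ?_⟩, ?_⟩
    · exact (hinv _).mpr ⟨by exact_mod_cast hmf2, by omega, by simpa using hmf⟩
    · have : (n.minFac : Int) * (n.minFac : Int) = ((n.minFac ^ 2 : Nat) : Int) := by
        push_cast; ring
      rw [this]; omega
    · have : ((n.minFac : Int)) ∣ ((n : Int)) := Int.natCast_dvd_natCast.mpr hdvd
      rwa [show ((n : Int)) = i by omega] at this

-- the invariant advances past a composite i
theorem primesUpTo_step_comp (primes : List Int) (i : Int) (_h2 : 2 ≤ i)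
    (hinv : PrimesUpTo primes i) (hnpr : ¬ Nat.Prime i.toNat) :
    PrimesUpTo primes (i + 1) := by
  intro p
  rw [hinv p]
  constructor
  · rintro ⟨a, b, c⟩; exact ⟨a, by omega, c⟩
  · rintro ⟨a, b, c⟩
    refine ⟨a, ?_, c⟩
    rcases lt_or_eq_of_le (by omega : p ≤ i) with h | h
    · exact h
    · exact absurd (h ▸ c) hnpr

-- the invariant advances past a prime i, appending it
theorem primesUpTo_step_prime (primes : List Int) (i : Int) (h2 : 2 ≤ i)
    (hinv : PrimesUpTo primes i) (hpr : Nat.Prime i.toNat) :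
    PrimesUpTo (primes ++ [i]) (i + 1) := by
  intro p
  simp only [List.mem_append, List.mem_singleton, hinv p]
  constructor
  · rintro (⟨a, b, c⟩ | rfl)
    · exact ⟨a, by omega, c⟩
    · exact ⟨h2, by omega, hpr⟩
  · rintro ⟨a, b, c⟩
    rcases lt_or_eq_of_le (by omega : p ≤ i) with h | h
    · exact Or.inl ⟨a, h, c⟩
    · exact Or.inr h

-- main loop lemma: under the invariant, B's loop computes A's fold
theorem altLoop_eq_foldl (k : Nat) : ∀ (i b : Int) (primes : List Int) (result : Int),
    (b - i).toNat = k → 4 ≤ i → PrimesUpTo primes i →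
    compositorialAltLoop (PySem.List.pyRange i b 1) primes result =
      (PySem.List.pyRange i b 1).foldl
        (fun resultado j => if !(esprimo j) then resultado * j else resultado) result := by
  induction k with
  | zero =>
    intro i b primes result hk h4 hinv
    rw [PySem.List.pyRange_one_eq_nil (by omega)]
    rfl
  | succ k ih =>
    intro i b primes result hk h4 hinv
    rw [PySem.List.pyRange_one_cons (by omega : i < b)]
    simp only [compositorialAltLoop, List.foldl_cons]
    have hcond := altCond_iff primes i h4 hinv
    have hesp := esprimo_eq_true_iff i (by omega)
    by_cases hpr : Nat.Prime i.toNat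
    · have hc : ((primes.filter (fun p => decide (p * p ≤ i))).any
          (fun p => PySem.Int.mod i p == 0)) = false := by
        rw [Bool.eq_false_iff]; intro h; exact (hcond.mp h) hpr
      have he : esprimo i = true := hesp.mpr hpr
      rw [hc, he]
      simp only [Bool.false_eq_true, if_false, Bool.not_true, Bool.false_eq_true, if_false]
      exact ih (i + 1) b (primes ++ [i]) result (by omega) (by omega)
        (primesUpTo_step_prime primes i (by omega) hinv hpr)
    · have hc : ((primes.filter (fun p => decide (p * p ≤ i))).any
          (fun p => PySem.Int.mod i p == 0)) = true := hcond.mpr hpr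
      have he : esprimo i = false := by
        rw [Bool.eq_false_iff]; intro h; exact hpr (hesp.mp h)
      rw [hc, he]
      simp only [if_true, Bool.not_false, if_true]
      exact ih (i + 1) b primes (result * i) (by omega) (by omega)
        (primesUpTo_step_comp primes i (by omega) hinv hpr)

theorem primesUpTo_init : PrimesUpTo [2, 3] 4 := by
  intro p
  simp only [List.mem_cons, List.not_mem_nil, or_false]
  constructor
  · rintro (rfl | rfl) <;> exact ⟨by norm_num, by norm_num, by decide⟩
  · rintro ⟨h2, h4, hpr⟩
    interval_cases p
    · left; rfl
    · right; rfl

-- ===== VERDICT (by name: the statement is the Claim_ definition above) =====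
theorem compositorial_spec : Claim_equal_compositorial := by
  intro num _
  unfold Spec_compositorial compositorial compositorial_alt
  by_cases h : num ≤ 3
  · simp [h]
  · simp only [h, if_false]
    exact (altLoop_eq_foldl (num + 1 - 4).toNat 4 (num + 1) [2, 3] 1 rfl (by omega)
      primesUpTo_init).symm
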